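-- pv_equiv track=rewrite | github.com/doobMM/hibari_tda | WK10/preprocess.py | fill_missing_indices_with_none
-- ===== SOURCE A (Python) =====
-- def fill_missing_indices_with_none(mapped_result : dict) -> dict :
--     """
--     mapped_result 딕셔너리의 비어있는 인덱스에 None 값을 채워넣고,
--     키 값을 기준으로 정렬된 새로운 딕셔너리를 반환합니다.
--
--     Args:
--         mapped_result (dict): 정수 키와 임의의 값을 갖는 딕셔너리.
--
--     Returns:
--         dict: 비어있는 인덱스가 None으로 채워지고, 키 값을 기준으로 정렬된 딕셔너리.
--     """
--
--     min_index = min(mapped_result.keys())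
--     max_index = max(mapped_result.keys())
--
--     filled_result = {}
--     for i in range(min_index, max_index + 1):
--         if i in mapped_result:
--             filled_result[i] = mapped_result[i]
--         else:
--             filled_result[i] = None
--
--     return filled_result
-- ===== SOURCE B (Python) =====
-- def fill_missing_indices_with_none(mapped_result : dict) -> dict :
--     out = {}
--     prev = None
--     for k, v in sorted(mapped_result.items(), key=lambda kv: kv[0]):
--         if prev is not None:
--             for j in range(prev + 1, k):
--                 out[j] = None
--         out[k] = v
--         prev = k
--     return out
-- ===== Notes on version B (the rewrite author's own statement) =====
-- stated objective: alternative
-- what changed: B sorts the items once and walks them left to right, filling only the gaps between consecutive keys with None, instead of scanning the whole index range with a per-index membership test; Pre_ excludes the empty dict, on which A's min() raises ValueError, and association lists with duplicate keys, which no Python dict can produce.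
import Mathlib
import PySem

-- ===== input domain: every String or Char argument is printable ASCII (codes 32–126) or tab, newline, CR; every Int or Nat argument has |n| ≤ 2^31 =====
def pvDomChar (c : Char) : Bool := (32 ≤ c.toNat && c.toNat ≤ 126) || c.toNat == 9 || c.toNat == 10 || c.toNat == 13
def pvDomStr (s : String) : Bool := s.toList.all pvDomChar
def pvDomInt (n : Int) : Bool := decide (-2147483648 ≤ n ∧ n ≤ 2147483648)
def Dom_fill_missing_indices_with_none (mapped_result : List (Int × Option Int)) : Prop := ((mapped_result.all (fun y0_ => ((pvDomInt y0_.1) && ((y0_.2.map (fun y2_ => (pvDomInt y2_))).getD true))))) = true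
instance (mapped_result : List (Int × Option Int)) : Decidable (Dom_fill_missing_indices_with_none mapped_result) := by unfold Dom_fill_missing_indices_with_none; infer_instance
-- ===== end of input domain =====

-- B replaces A's per-index membership-test scan of the full key range by sorting the items once
-- and filling only the gaps between consecutive keys with none (objective: alternative).


-- ===== PORT A =====
-- Literal port of A: min/max of the keys, then one loop over range(min, max+1) with a
-- membership test per index.  (min/max of an empty dict raise ValueError: the `| _, _ => []`
-- arm is unreachable under Pre_.)
def fill_missing_indices_with_none (mapped_result : List (Int × Option Int)) : List (Int × Option Int) :=
  let d := PySem.Dict.mk mapped_result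
  match PySem.List.min? d.keys (fun k => k), PySem.List.max? d.keys (fun k => k) with
  | some min_index, some max_index =>
      ((PySem.List.pyRange min_index (max_index + 1)).foldl
        (fun filled i =>
          if d.contains i then
            filled.insert i ((d.get? i).getD none)   -- mapped_result[i] (present, so getD never defaults)
          else
            filled.insert i none)
        PySem.Dict.empty).items
  | _, _ => []

-- ===== PORT B =====
-- loop body of B: fill the gap (prev+1 .. k-1) with none, then write the item itself
def bStep (st : PySem.Dict Int (Option Int) × Option Int) (kv : Int × Option Int) :
    PySem.Dict Int (Option Int) × Option Int :=
  let out := match st.2 with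
    | some prev => (PySem.List.pyRange (prev + 1) kv.1).foldl (fun (o : PySem.Dict Int (Option Int)) j => o.insert j none) st.1
    | none => st.1
  (out.insert kv.1 kv.2, some kv.1)

def fill_missing_indices_with_none_alt (mapped_result : List (Int × Option Int)) : List (Int × Option Int) :=
  ((PySem.List.sorted mapped_result (fun kv => kv.1)).foldl bStep
    (PySem.Dict.empty, none)).1.items

-- ===== PRECONDITION & SPEC =====
-- Pre_ excludes the empty dict, on which A's min() raises ValueError, and association lists
-- with duplicate keys, which do not represent any Python dict.
def Pre_fill_missing_indices_with_none (mapped_result : List (Int × Option Int)) : Prop :=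
  mapped_result ≠ [] ∧ (mapped_result.map Prod.fst).Nodup
instance (mapped_result : List (Int × Option Int)) : Decidable (Pre_fill_missing_indices_with_none mapped_result) := by unfold Pre_fill_missing_indices_with_none; infer_instance
def pvWitness_fill_missing_indices_with_none : (List (Int × Option Int)) := [(3, some 7), (1, none)]

def Spec_fill_missing_indices_with_none (mapped_result : List (Int × Option Int)) (out : List (Int × Option Int)) : Prop := out = fill_missing_indices_with_none_alt mapped_result
instance (mapped_result : List (Int × Option Int)) (out : List (Int × Option Int)) : Decidable (Spec_fill_missing_indices_with_none mapped_result out) := by unfold Spec_fill_missing_indices_with_none; infer_instance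

-- ===== CLAIM (what is proved, stated in full; the proofs are below) =====
def Claim_equal_fill_missing_indices_with_none : Prop := ∀ (mapped_result : List (Int × Option Int)), Dom_fill_missing_indices_with_none mapped_result → Pre_fill_missing_indices_with_none mapped_result → Spec_fill_missing_indices_with_none mapped_result (fill_missing_indices_with_none mapped_result)

-- ===== LEMMAS AND PROOFS =====

def fKey (m : List (Int × Option Int)) (i : Int) : Option Int :=
  if (PySem.Dict.mk m).contains i then ((PySem.Dict.mk m).get? i).getD none else none

theorem fKey_of_mem {m : List (Int × Option Int)} {k : Int} {v : Option Int}
    (hnd : (m.map Prod.fst).Nodup) (hmem : (k, v) ∈ m) : fKey m k = v := by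
  have hk : (PySem.Dict.mk m).keys.Nodup := by simpa [PySem.Dict.keys_mk] using hnd
  have hget : (PySem.Dict.mk m).get? k = some v :=
    PySem.Dict.get?_of_mem_items _ (by simpa using hmem) hk
  have hc : (PySem.Dict.mk m).contains k = true :=
    (PySem.Dict.contains_iff_mem_keys _ _).mpr (by
      simp [PySem.Dict.keys_mk]
      exact ⟨v, hmem⟩)
  simp [fKey, hc, hget]

theorem fKey_of_not_key {m : List (Int × Option Int)} {k : Int}
    (h : k ∉ m.map Prod.fst) : fKey m k = none := by
  have hc : (PySem.Dict.mk m).contains k = false := by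
    rw [PySem.Dict.contains_eq_decide_mem_keys]
    simp [PySem.Dict.keys_mk]
    intro a b
    exact h (by simpa using List.mem_map_of_mem (f := Prod.fst) b)
  simp [fKey, hc]

theorem A_eq_map {m : List (Int × Option Int)} {mn mx : Int}
    (hmn : PySem.List.min? (PySem.Dict.mk m).keys (fun k => k) = some mn)
    (hmx : PySem.List.max? (PySem.Dict.mk m).keys (fun k => k) = some mx) :
    fill_missing_indices_with_none m
      = (PySem.List.pyRange mn (mx + 1)).map (fun i => (i, fKey m i)) := by
  unfold fill_missing_indices_with_none
  simp only [hmn, hmx]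
  have hstep : (fun (filled : PySem.Dict Int (Option Int)) i =>
      if (PySem.Dict.mk m).contains i then
        filled.insert i (((PySem.Dict.mk m).get? i).getD none)
      else
        filled.insert i none)
      = fun filled i => filled.insert i (fKey m i) := by
    funext filled i
    unfold fKey
    split_ifs <;> rfl
  rw [hstep]
  have := PySem.Dict.items_foldl_insert_fresh (PySem.List.pyRange mn (mx + 1))
      (fun i => i) (fKey m) PySem.Dict.empty
      (fun a _ => PySem.Dict.contains_empty a)
      (by simpa using PySem.List.nodup_pyRange_one mn (mx + 1))
  simpa using this

theorem keys_of_items_map {d : PySem.Dict Int (Option Int)} {r : List Int}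
    (h : d.items = r.map (fun i => (i, fKey mm i))) : d.keys = r := by
  unfold PySem.Dict.keys
  rw [h, List.map_map]
  exact List.map_id'' (congrFun rfl) r

theorem B_loop (m : List (Int × Option Int))
    (t : List (Int × Option Int)) (a : Int) :
    ∀ (p : Int) (d : PySem.Dict Int (Option Int)),
    t.Pairwise (fun x y => x.1 < y.1) →
    (∀ kv ∈ t, p < kv.1) →
    (∀ kv ∈ t, kv ∈ m) →
    ((m.map Prod.fst).Nodup) →
    (∀ j ∈ m.map Prod.fst, j ≤ p ∨ j ∈ t.map Prod.fst) →
    (d.items = (PySem.List.pyRange a (p + 1)).map (fun i => (i, fKey m i))) →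
    (a ≤ p) →
    ∃ q : Int, (t.foldl bStep (d, some p)).2 = some q ∧
      (t.foldl bStep (d, some p)).1.items
        = (PySem.List.pyRange a (q + 1)).map (fun i => (i, fKey m i)) ∧
      (q = p ∨ q ∈ t.map Prod.fst) ∧
      (∀ j ∈ m.map Prod.fst, j ≤ q) := by
  induction t with
  | nil =>
      intro p d _ _ _ _ hcov hitems hap
      refine ⟨p, rfl, hitems, Or.inl rfl, fun j hj => ?_⟩
      rcases hcov j hj with h | h
      · exact h
      · simp at h
  | cons kv t' ih =>
      intro p d hpw hgt hsub hnd hcov hitems hap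
      obtain ⟨k, v⟩ := kv
      have hpk : p < k := hgt (k, v) (List.mem_cons_self)
      have hpw' := (List.pairwise_cons.mp hpw).2
      have hgt' : ∀ kv ∈ t', k < kv.1 := fun kv h => (List.pairwise_cons.mp hpw).1 kv h
      -- the dict's keys are exactly pyRange a (p+1)
      have hkeys : d.keys = PySem.List.pyRange a (p + 1) := keys_of_items_map hitems
      -- gap fill appends (j, none) for j in (p, k)
      have hfresh : ∀ j ∈ PySem.List.pyRange (p + 1) k, d.contains j = false := by
        intro j hj
        rw [PySem.Dict.contains_eq_decide_mem_keys, hkeys]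
        have := (PySem.List.mem_pyRange_one.mp hj).1
        simp [PySem.List.mem_pyRange_one]
        omega
      have hout : ((PySem.List.pyRange (p + 1) k).foldl
          (fun (o : PySem.Dict Int (Option Int)) j => o.insert j none) d).items
          = d.items ++ (PySem.List.pyRange (p + 1) k).map (fun j => (j, (none : Option Int))) := by
        have := PySem.Dict.items_foldl_insert_fresh (PySem.List.pyRange (p + 1) k)
          (fun j => j) (fun _ => (none : Option Int)) d hfresh
          (by simpa using PySem.List.nodup_pyRange_one (p + 1) k)
        simpa using this
      -- gap indices are not keys of m
      have hgap : ∀ j ∈ PySem.List.pyRange (p + 1) k, ((j, (none : Option Int)) : Int × Option Int) = (j, fKey m j) := by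
        intro j hj
        obtain ⟨h1, h2⟩ := PySem.List.mem_pyRange_one.mp hj
        have : j ∉ m.map Prod.fst := by
          intro hjm
          rcases hcov j hjm with h | h
          · omega
          · obtain ⟨kv', hkv', hfst⟩ := List.mem_map.mp h
            rcases List.mem_cons.mp hkv' with h' | h'
            · rw [h'] at hfst; simp at hfst; omega
            · have := hgt' kv' h'
              omega
        rw [fKey_of_not_key this]
      set out := (PySem.List.pyRange (p + 1) k).foldl
          (fun (o : PySem.Dict Int (Option Int)) j => o.insert j none) d with hout_def
      have houtitems : out.items = (PySem.List.pyRange a k).map (fun i => (i, fKey m i)) := by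
        rw [hout, hitems, List.map_congr_left hgap, ← List.map_append,
          ← PySem.List.pyRange_one_append a (p + 1) k (by omega) (by omega)]
      have houtkeys : out.keys = PySem.List.pyRange a k := keys_of_items_map houtitems
      have hkfresh : out.contains k = false := by
        rw [PySem.Dict.contains_eq_decide_mem_keys, houtkeys]
        simp [PySem.List.mem_pyRange_one]
      have hd2 : (out.insert k v).items
          = (PySem.List.pyRange a (k + 1)).map (fun i => (i, fKey m i)) := by
        rw [PySem.Dict.items_insert_of_not_contains out v hkfresh, houtitems,
          PySem.List.pyRange_one_append a k (k + 1) (by omega) (by omega),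
          List.map_append]
        simp [PySem.List.pyRange_one_singleton]
        exact (fKey_of_mem hnd (hsub (k, v) (List.mem_cons_self))).symm
      have hcov' : ∀ j ∈ m.map Prod.fst, j ≤ k ∨ j ∈ t'.map Prod.fst := by
        intro j hj
        rcases hcov j hj with h | h
        · left; omega
        · simp at h
          rcases h with h | h
          · left; omega
          · right; simpa using h
      have hstep : List.foldl bStep (d, some p) ((k, v) :: t')
          = List.foldl bStep (out.insert k v, some k) t' := by
        simp [List.foldl_cons, bStep, hout_def]
      rw [hstep]
      obtain ⟨q, h1, h2, h3, h4⟩ := ih k (out.insert k v) hpw' hgt'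
        (fun kv h => hsub kv (List.mem_cons_of_mem _ h)) hnd hcov' hd2 (by omega)
      refine ⟨q, h1, h2, ?_, h4⟩
      right
      rcases h3 with h | h
      · simp [h]
      · simp
        right
        simpa using h

theorem main_equiv (m : List (Int × Option Int)) (hne : m ≠ []) (hnd : (m.map Prod.fst).Nodup) :
    fill_missing_indices_with_none m = fill_missing_indices_with_none_alt m := by
  -- min and max exist
  have hkeysmk : (PySem.Dict.mk m).keys = m.map Prod.fst := PySem.Dict.keys_mk m
  have hkne : (PySem.Dict.mk m).keys ≠ [] := by
    rw [hkeysmk]; simpa using hne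
  obtain ⟨mn, hmn⟩ : ∃ mn, PySem.List.min? (PySem.Dict.mk m).keys (fun k => k) = some mn := by
    cases h : PySem.List.min? (PySem.Dict.mk m).keys (fun k => k) with
    | none => exact absurd ((PySem.List.min?_eq_none_iff _ _).mp h) hkne
    | some x => exact ⟨x, rfl⟩
  obtain ⟨mx, hmx⟩ : ∃ mx, PySem.List.max? (PySem.Dict.mk m).keys (fun k => k) = some mx := by
    cases h : PySem.List.max? (PySem.Dict.mk m).keys (fun k => k) with
    | none => exact absurd ((PySem.List.max?_eq_none_iff _ _).mp h) hkne
    | some x => exact ⟨x, rfl⟩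
  -- the sorted list
  set s := PySem.List.sorted m (fun kv => kv.1) with hs
  have hperm : s.Perm m := PySem.List.sorted_perm m (fun kv => kv.1) false
  have hsne : s ≠ [] := by
    intro h
    exact hne ((PySem.List.sorted_eq_nil_iff m (fun kv => kv.1) false).mp h)
  -- strictly increasing keys
  have hsnd : (s.map Prod.fst).Nodup := ((hperm.map Prod.fst).nodup_iff).mpr hnd
  have hle : s.Pairwise (fun x y => x.1 ≤ y.1) := PySem.List.sorted_pairwise m (fun kv => kv.1)
  have hlt : s.Pairwise (fun x y => x.1 < y.1) := by
    have hne' : s.Pairwise (fun x y => x.1 ≠ y.1) := List.pairwise_map.mp hsnd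
    exact (hle.and hne').imp (fun h => lt_of_le_of_ne h.1 h.2)
  obtain ⟨⟨k0, v0⟩, rest, hcons⟩ : ∃ kv rest, s = kv :: rest := by
    cases hsc : s with
    | nil => exact absurd hsc hsne
    | cons x r => exact ⟨x, r, rfl⟩
  -- first fold step
  have hfirst : List.foldl bStep (PySem.Dict.empty, none) s
      = List.foldl bStep (PySem.Dict.empty.insert k0 v0, some k0) rest := by
    rw [hcons]
    rfl
  have hmem0 : (k0, v0) ∈ m := hperm.mem_iff.mp (by rw [hcons]; exact List.mem_cons_self)
  have hd0 : (PySem.Dict.empty.insert k0 v0).items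
      = (PySem.List.pyRange k0 (k0 + 1)).map (fun i => (i, fKey m i)) := by
    rw [PySem.Dict.items_insert_of_not_contains _ v0 (PySem.Dict.contains_empty k0),
      PySem.List.pyRange_one_singleton]
    have hemp : (PySem.Dict.empty : PySem.Dict Int (Option Int)).items = [] := rfl
    rw [hemp]
    simp
    exact (fKey_of_mem hnd hmem0).symm
  have hglt : ∀ kv ∈ rest, k0 < kv.1 := by
    rw [hcons] at hlt
    exact fun kv h => (List.pairwise_cons.mp hlt).1 kv h
  have hcov : ∀ j ∈ m.map Prod.fst, j ≤ k0 ∨ j ∈ rest.map Prod.fst := by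
    intro j hj
    obtain ⟨kv, hkv, hfst⟩ := List.mem_map.mp hj
    have : kv ∈ s := hperm.mem_iff.mpr hkv
    rw [hcons] at this
    rcases List.mem_cons.mp this with h | h
    · left; rw [← hfst, h]
    · right; exact hfst ▸ List.mem_map_of_mem h
  obtain ⟨q, h1, h2, h3, h4⟩ := B_loop m rest k0 k0 (PySem.Dict.empty.insert k0 v0)
    (by rw [hcons] at hlt; exact (List.pairwise_cons.mp hlt).2)
    hglt
    (fun kv h => hperm.mem_iff.mp (by rw [hcons]; exact List.mem_cons_of_mem _ h))
    hnd hcov hd0 le_rfl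
  -- mn = k0
  have hk0mem : k0 ∈ m.map Prod.fst := List.mem_map_of_mem hmem0
  have hmneq : mn = k0 := by
    have h1' : mn ≤ k0 := by
      have := PySem.List.min?_isMin hmn k0 (by rwa [hkeysmk])
      simpa using this
    have h2' : k0 ≤ mn := by
      have hmnmem : mn ∈ m.map Prod.fst := by
        have := PySem.List.min?_mem hmn; rwa [hkeysmk] at this
      obtain ⟨kv, hkv, hfst⟩ := List.mem_map.mp hmnmem
      have := PySem.List.key_head_sorted_le m (fun kv => kv.1) (hs ▸ hcons) kv hkv
      simpa [hfst] using this
    omega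
  -- mx = q
  have hmxeq : mx = q := by
    have h1' : mx ≤ q := by
      have hmxmem : mx ∈ m.map Prod.fst := by
        have := PySem.List.max?_mem hmx; rwa [hkeysmk] at this
      exact h4 mx hmxmem
    have h2' : q ≤ mx := by
      have hqmem : q ∈ m.map Prod.fst := by
        rcases h3 with h | h
        · rw [h]; exact hk0mem
        · obtain ⟨kv, hkv, hfst⟩ := List.mem_map.mp h
          exact hfst ▸ List.mem_map_of_mem
            (hperm.mem_iff.mp (by rw [hcons]; exact List.mem_cons_of_mem _ hkv))
      have := PySem.List.max?_isMax hmx q (by rwa [hkeysmk])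
      simpa using this
    omega
  rw [A_eq_map hmn hmx, fill_missing_indices_with_none_alt, ← hs, hfirst, h2, hmneq, hmxeq]

-- ===== VERDICT (by name: the statement is the Claim_ definition above) =====
theorem fill_missing_indices_with_none_spec : Claim_equal_fill_missing_indices_with_none := by
  intro m _ hPre
  show fill_missing_indices_with_none m = fill_missing_indices_with_none_alt m
  exact main_equiv m hPre.1 hPre.2
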